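-- pv_equiv track=rewrite | github.com/sepkascurty-cpu/xcp-xss-pro | xcp.py | count_event_handlers
-- ===== SOURCE A (Python) =====
-- def count_event_handlers(text):
--     """Hitung event handlers dalam HTML"""
--     events = [
--         'onload', 'onerror', 'onclick', 'onmouseover', 'onmouseenter',
--         'onfocus', 'onblur', 'onchange', 'onsubmit', 'onkeydown',
--         'onkeypress', 'onkeyup', 'onselect', 'onresize', 'onscroll'
--     ]
--
--     count = 0
--     for event in events:
--         count += text.lower().count(event)
--
--     return count
-- ===== SOURCE B (Python) =====
-- _EVENTS = (
--     'onload', 'onerror', 'onclick', 'onmouseover', 'onmouseenter',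
--     'onfocus', 'onblur', 'onchange', 'onsubmit', 'onkeydown',
--     'onkeypress', 'onkeyup', 'onselect', 'onresize', 'onscroll'
-- )
--
--
-- def count_event_handlers(text):
--     """Hitung event handlers dalam HTML (single left-to-right scan)."""
--     t = text.lower()
--     return sum(1 for i in range(len(t))
--                if any(t[i:i + len(e)] == e for e in _EVENTS))
-- ===== Notes on version B (the rewrite author's own statement) =====
-- stated objective: alternative
-- what changed: Replaces 15 independent full substring scans (one str.count per event name) with a single left-to-right pass over the lowered text that counts positions where any event name starts; correct because the event names are prefix-free and self-overlap-free.
import Mathlib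
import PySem

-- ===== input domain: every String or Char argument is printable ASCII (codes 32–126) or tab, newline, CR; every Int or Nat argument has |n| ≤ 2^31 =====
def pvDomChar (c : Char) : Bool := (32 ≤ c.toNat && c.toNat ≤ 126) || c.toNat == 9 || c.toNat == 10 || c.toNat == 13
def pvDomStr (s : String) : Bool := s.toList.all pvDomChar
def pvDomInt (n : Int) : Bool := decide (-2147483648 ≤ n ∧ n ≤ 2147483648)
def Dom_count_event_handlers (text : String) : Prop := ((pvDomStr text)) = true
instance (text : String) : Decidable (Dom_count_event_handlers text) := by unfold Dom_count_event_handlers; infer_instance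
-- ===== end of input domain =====

-- B replaces A's fifteen separate full-text substring counts by a single left-to-right
-- scan that counts positions where any event name starts (objective: alternative).

-- ===== PORT A =====
def pvEventsA : List String :=
  ["onload", "onerror", "onclick", "onmouseover", "onmouseenter",
   "onfocus", "onblur", "onchange", "onsubmit", "onkeydown",
   "onkeypress", "onkeyup", "onselect", "onresize", "onscroll"]

def count_event_handlers (text : String) : Int :=
  pvEventsA.foldl (fun count event => count + (PySem.Str.count (PySem.Str.lower text) event : Int)) 0

-- ===== PORT B =====
def pvEventsB : List (List Char) :=
  ["onload".toList, "onerror".toList, "onclick".toList, "onmouseover".toList, "onmouseenter".toList,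
   "onfocus".toList, "onblur".toList, "onchange".toList, "onsubmit".toList, "onkeydown".toList,
   "onkeypress".toList, "onkeyup".toList, "onselect".toList, "onresize".toList, "onscroll".toList]

-- the lowered string handled as its code-point list (exact on the ASCII domain);
-- sum(1 for i in range(len(t)) if …) is the countP over the index range
def count_event_handlers_alt (text : String) : Int :=
  let t := (PySem.Str.lower text).toList
  ((List.range t.length).countP (fun i : Nat =>
      pvEventsB.any (fun e =>
        PySem.List.slice t (some (i : Int)) (some ((i : Int) + (e.length : Int))) == e)) : Int)

-- ===== PRECONDITION & SPEC =====
def Spec_count_event_handlers (text : String) (out : Int) : Prop := out = count_event_handlers_alt text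
instance (text : String) (out : Int) : Decidable (Spec_count_event_handlers text out) := by unfold Spec_count_event_handlers; infer_instance

-- ===== CLAIM (what is proved, stated in full; the proofs are below) =====
def Claim_equal_count_event_handlers : Prop := ∀ (text : String), Dom_count_event_handlers text → Spec_count_event_handlers text (count_event_handlers text)

-- ===== LEMMAS AND PROOFS =====

-- an event name has no nonempty proper border (no suffix of it is one of its prefixes)
abbrev pvNoBorder (sub : List Char) : Prop :=
  ∀ j ∈ List.range sub.length, 0 < j → ¬ (sub.drop j <+: sub)

lemma pv_no_overlap (sub l : List Char) (hnb : pvNoBorder sub) (hpre : sub <+: l)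
    (j : Nat) (h0 : 0 < j) (hj : j < sub.length) : ¬ sub <+: l.drop j := by
  obtain ⟨r, rfl⟩ := hpre
  intro h
  rw [List.drop_append_of_le_length (by omega)] at h
  have h2 : sub.drop j <+: sub.drop j ++ r := List.prefix_append _ _
  rcases List.prefix_or_prefix_of_prefix h h2 with h3 | h3
  · have := h3.length_le
    simp only [List.length_drop] at this
    omega
  · exact hnb j (by simp [List.mem_range]; omega) h0 h3

lemma pv_countP_range_split (p : Nat → Bool) (k m : Nat) :
    (List.range (k + m)).countP p
      = (List.range k).countP p + (List.range m).countP (fun i => p (k + i)) := by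
  rw [List.range_add, List.countP_append, List.countP_map]
  rfl

lemma pv_countP_range_one_true (p : Nat → Bool) (k : Nat) (hk : 0 < k) (h0 : p 0 = true)
    (h : ∀ j, 0 < j → j < k → p j = false) : (List.range k).countP p = 1 := by
  induction k with
  | zero => omega
  | succ n ih =>
    rw [List.range_succ, List.countP_append]
    by_cases hn : n = 0
    · subst hn; simp [h0]
    · have hf : p n = false := h n (by omega) (by omega)
      have := ih (by omega) (fun j hj1 hj2 => h j hj1 (by omega))
      simp [hf, this]

lemma pv_go_spec (sub : List Char) (hne : sub ≠ []) (hnb : pvNoBorder sub) :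
    ∀ (fuel : Nat) (l : List Char) (acc : Nat), l.length ≤ fuel →
      PySem.Chars.count.go sub fuel l acc
        = acc + (List.range l.length).countP (fun i => sub.isPrefixOf (l.drop i)) := by
  intro fuel
  induction fuel with
  | zero =>
    intro l acc hl
    have : l = [] := List.eq_nil_of_length_eq_zero (by omega)
    subst this
    simp [PySem.Chars.count.go]
  | succ n ih =>
    intro l acc hl
    match l with
    | [] => simp [PySem.Chars.count.go]
    | c :: t =>
      have hs : 0 < sub.length := List.length_pos_of_ne_nil hne
      by_cases hp : sub.isPrefixOf (c :: t) = true
      · have hpre : sub <+: (c :: t) := List.isPrefixOf_iff_prefix.mp hp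
        have hlen : sub.length ≤ (c :: t).length := hpre.length_le
        rw [PySem.Chars.count.go, if_pos hp]
        rw [ih (List.drop sub.length (c :: t)) (acc + 1)
          (by simp only [List.length_drop, List.length_cons]
              simp only [List.length_cons] at hl
              omega)]
        have hrange : (c :: t).length = sub.length + ((c :: t).length - sub.length) := by omega
        rw [hrange, pv_countP_range_split]
        have h1 : (List.range sub.length).countP (fun i => sub.isPrefixOf ((c :: t).drop i)) = 1 := by
          refine pv_countP_range_one_true _ _ hs (by simpa using hp) ?_
          intro j hj1 hj2
          cases hx : sub.isPrefixOf ((c :: t).drop j) with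
          | false => rfl
          | true =>
            exact absurd (List.isPrefixOf_iff_prefix.mp hx)
              (pv_no_overlap sub (c :: t) hnb hpre j hj1 hj2)
        have h2 : ∀ i : Nat, ((c :: t).drop sub.length).drop i = (c :: t).drop (sub.length + i) := by
          intro i; rw [List.drop_drop]
        have h3 : (List.range ((c :: t).length - sub.length)).countP
              (fun i => sub.isPrefixOf (((c :: t).drop sub.length).drop i))
            = (List.range ((c :: t).length - sub.length)).countP
              (fun i => sub.isPrefixOf ((c :: t).drop (sub.length + i))) := by
          apply List.countP_congr; intro i _; rw [h2]
        simp only [List.length_drop] at *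
        rw [h1, h3]
        omega
      · rw [PySem.Chars.count.go, if_neg hp]
        rw [ih t acc (by simpa using Nat.le_of_succ_le_succ hl)]
        have hr : (c :: t).length = 1 + t.length := by simp; omega
        rw [hr, pv_countP_range_split]
        have h0 : (List.range 1).countP (fun i => sub.isPrefixOf ((c :: t).drop i)) = 0 := by
          simp only [List.range_one, List.countP_cons, List.countP_nil, List.drop_zero]
          simp [hp]
        have h1 : (List.range t.length).countP (fun i => sub.isPrefixOf ((c :: t).drop (1 + i)))
            = (List.range t.length).countP (fun i => sub.isPrefixOf (t.drop i)) := by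
          apply List.countP_congr; intro i _
          have : (c :: t).drop (1 + i) = t.drop i := by
            rw [Nat.add_comm]; rfl
          rw [this]
        rw [h0, h1]
        omega

lemma pv_count_eq (sub l : List Char) (hne : sub ≠ []) (hnb : pvNoBorder sub) :
    PySem.Chars.count l sub
      = (List.range l.length).countP (fun i => sub.isPrefixOf (l.drop i)) := by
  unfold PySem.Chars.count
  rw [if_neg (by simpa [List.isEmpty_iff] using hne)]
  rw [pv_go_spec sub hne hnb l.length l 0 le_rfl]
  omega

lemma pv_countP_or {α : Type} (l : List α) (p q : α → Bool) (h : ∀ a, p a = true → q a = false) :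
    l.countP (fun a => p a || q a) = l.countP p + l.countP q := by
  induction l with
  | nil => simp
  | cons a t ih =>
    by_cases hpa : p a = true
    · have hqa := h a hpa
      simp [hpa, hqa, ih]
      omega
    · have hpa' : p a = false := by simpa using hpa
      simp [List.countP_cons, hpa', ih]
      by_cases hqa : q a = true <;> (simp [hqa]; try omega)

lemma pv_sum_counts (E : List (List Char))
    (hpf : E.Pairwise (fun a b => ¬ (a <+: b) ∧ ¬ (b <+: a))) (l : List Char) :
    (List.range l.length).countP (fun i => E.any (fun e => e.isPrefixOf (l.drop i)))
      = (E.map (fun e => (List.range l.length).countP (fun i => e.isPrefixOf (l.drop i)))).sum := by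
  induction E with
  | nil => simp
  | cons e R ih =>
    rcases List.pairwise_cons.mp hpf with ⟨hhead, htail⟩
    have hdisj : ∀ i : Nat, e.isPrefixOf (l.drop i) = true →
        (R.any (fun f => f.isPrefixOf (l.drop i))) = false := by
      intro i he
      rw [← Bool.not_eq_true]
      simp only [List.any_eq_true, not_exists]
      intro f hf
      obtain ⟨hfR, hfp⟩ := hf
      have hep : e <+: l.drop i := List.isPrefixOf_iff_prefix.mp he
      have hfp' : f <+: l.drop i := List.isPrefixOf_iff_prefix.mp hfp
      rcases List.prefix_or_prefix_of_prefix hep hfp' with h3 | h3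
      · exact (hhead f hfR).1 h3
      · exact (hhead f hfR).2 h3
    have hstep : (fun i => (e :: R).any (fun f => f.isPrefixOf (l.drop i)))
        = (fun i => (e.isPrefixOf (l.drop i)) || R.any (fun f => f.isPrefixOf (l.drop i))) := by
      funext i; simp [List.any_cons]
    rw [hstep, pv_countP_or _ _ _ hdisj, ih htail]
    simp

lemma pv_test_eq (t e : List Char) (i : Nat) :
    (PySem.List.slice t (some (i : Int)) (some ((i : Int) + (e.length : Int))) == e)
      = e.isPrefixOf (t.drop i) := by
  rw [PySem.List.slice_natCast_add]
  by_cases h : e <+: t.drop i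
  · have h1 : ((t.drop i).take e.length == e) = true := by
      rw [beq_iff_eq]; exact (List.prefix_iff_eq_take.mp h).symm
    rw [h1]
    exact (List.isPrefixOf_iff_prefix.mpr h).symm
  · have h1 : ((t.drop i).take e.length == e) = false := by
      rw [beq_eq_false_iff_ne]
      intro hx
      exact h (hx ▸ List.take_prefix _ _)
    have h2 : e.isPrefixOf (t.drop i) = false := by
      rw [← Bool.not_eq_true, List.isPrefixOf_iff_prefix]; exact h
    rw [h1, h2]

lemma pv_cast_sum (l : List Nat) : ((l.sum : Nat) : Int) = (l.map (fun n => (n : Int))).sum := by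
  induction l with
  | nil => simp
  | cons a t ih => simp [ih]

-- ===== VERDICT (by name: the statement is the Claim_ definition above) =====
theorem count_event_handlers_spec : Claim_equal_count_event_handlers := by
  intro text _
  unfold Spec_count_event_handlers
  unfold count_event_handlers count_event_handlers_alt
  set L := (PySem.Str.lower text).toList with hL
  have hEB : pvEventsB = pvEventsA.map String.toList := by rfl
  have hevents : ∀ e ∈ pvEventsB, e ≠ [] ∧ pvNoBorder e := by decide
  have hpf : pvEventsB.Pairwise (fun a b => ¬ (a <+: b) ∧ ¬ (b <+: a)) := by decide
  -- A side: the fold is the sum of the fifteen counts, each count is a countP of positions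
  have hA : pvEventsA.foldl
        (fun count event => count + (PySem.Str.count (PySem.Str.lower text) event : Int)) 0
      = (pvEventsB.map (fun e => ((List.range L.length).countP
            (fun i : Nat => e.isPrefixOf (L.drop i)) : Int))).sum := by
    rw [PySem.List.foldl_add]
    have : pvEventsA.map (fun event => (PySem.Str.count (PySem.Str.lower text) event : Int))
        = pvEventsB.map (fun e => ((List.range L.length).countP
            (fun i : Nat => e.isPrefixOf (L.drop i)) : Int)) := by
      rw [hEB, List.map_map]
      apply List.map_congr_left
      intro ev hev
      have hmem : ev.toList ∈ pvEventsB := by rw [hEB]; exact List.mem_map_of_mem hev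
      have := hevents ev.toList hmem
      simp only [Function.comp]
      rw [PySem.Str.count_eq, ← hL, pv_count_eq ev.toList L this.1 this.2]
    rw [this]; ring_nf
  -- B side: the any-test is the prefix test, then split by event
  have hB : (List.range L.length).countP (fun i : Nat =>
        pvEventsB.any (fun e =>
          PySem.List.slice L (some (i : Int)) (some ((i : Int) + (e.length : Int))) == e))
      = ((pvEventsB.map (fun e => (List.range L.length).countP
            (fun i => e.isPrefixOf (L.drop i)))).sum) := by
    have : (fun i : Nat => pvEventsB.any (fun e =>
          PySem.List.slice L (some (i : Int)) (some ((i : Int) + (e.length : Int))) == e))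
        = (fun i : Nat => pvEventsB.any (fun e => e.isPrefixOf (L.drop i))) := by
      funext i
      congr 1
      funext e
      exact pv_test_eq L e i
    rw [this]
    exact pv_sum_counts pvEventsB hpf L
  rw [hA]
  simp only [hB, pv_cast_sum]
  rfl
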